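-- pv_equiv track=rewrite | github.com/JerryChen97/Chiral-Spin-Liquid | expectation_QCM.py | symmetrize
-- ===== SOURCE A (Python) =====
-- from itertools import permutations
--
-- def symmetrize(op_list, mode='full'):
--     # Here op is a temporary var
--     op_name_list = [op[0] for op in op_list]
--     op_pos_list = [op[1] for op in op_list]
--     l = len(op_list)
--     if mode == 'cyclic':
--         new_op_list = []
--         for off_set in range(l):
--             op = [(op_name_list[(i+off_set)%l], op_pos_list[i]) for i in range(l)]
--             new_op_list.append(op)
--         return new_op_list
--     elif mode == 'full':
--
--         new_op_list = []
--
--         all_perm = (list(permutations(op_name_list)))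
--         for perm_name_list in all_perm:
--             op = [(perm_name_list[i], op_pos_list[i]) for i in range(l)]
--             new_op_list.append(op)
--         return new_op_list
--
--     raise NotImplemented()
-- ===== SOURCE B (Python) =====
-- def symmetrize(op_list, mode='full'):
--     names = [op[0] for op in op_list]
--     if mode == 'cyclic':
--         return [[(n, op[1]) for n, op in zip(names[off:] + names[:off], op_list)]
--                 for off in range(len(op_list))]
--     if mode == 'full':
--         out = []
--
--         def build(remaining, rest_ops, prefix):
--             if not rest_ops:
--                 out.append(prefix)
--                 return
--             pos = rest_ops[0][1]
--             for i, n in enumerate(remaining):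
--                 build(remaining[:i] + remaining[i + 1:], rest_ops[1:],
--                       prefix + [(n, pos)])
--
--         build(names, op_list, [])
--         return out
--     raise NotImplementedError(mode)
-- ===== Notes on version B (the rewrite author's own statement) =====
-- stated objective: alternative
-- what changed: B replaces itertools.permutations-then-zip with a recursive generator that picks each remaining name in index order and builds each (name, position) row directly, and builds cyclic rotations by list slicing instead of modular indexing.
import Mathlib
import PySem

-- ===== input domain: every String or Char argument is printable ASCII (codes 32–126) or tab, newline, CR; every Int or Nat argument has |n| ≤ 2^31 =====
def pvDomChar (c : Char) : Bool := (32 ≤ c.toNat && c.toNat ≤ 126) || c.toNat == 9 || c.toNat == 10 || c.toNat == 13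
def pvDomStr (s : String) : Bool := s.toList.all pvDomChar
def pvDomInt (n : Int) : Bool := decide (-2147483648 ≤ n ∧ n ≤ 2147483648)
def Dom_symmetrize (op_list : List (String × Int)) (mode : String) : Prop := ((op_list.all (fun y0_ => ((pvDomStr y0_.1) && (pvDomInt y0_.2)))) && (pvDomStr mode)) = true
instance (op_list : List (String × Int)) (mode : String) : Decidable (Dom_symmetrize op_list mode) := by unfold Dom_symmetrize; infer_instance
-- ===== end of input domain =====

-- B replaces itertools.permutations with a recursive generator that builds each (name, position)
-- row directly (and builds cyclic rotations by slicing); objective: alternative decomposition, same cost.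


-- ===== PORT A =====
def symmetrize (op_list : List (String × Int)) (mode : String) : List (List (String × Int)) :=
  let op_name_list := op_list.map (fun op => op.1)
  let op_pos_list := op_list.map (fun op => op.2)
  let l : Int := op_list.length
  if mode = "cyclic" then
    (PySem.List.pyRange 0 l 1).foldl (fun new_op_list off_set =>
      new_op_list ++ [(PySem.List.pyRange 0 l 1).map (fun i =>
        (PySem.List.pyGetD op_name_list (PySem.Int.mod (i + off_set) l) "",
         PySem.List.pyGetD op_pos_list i 0))]) []
  else if mode = "full" then
    (PySem.List.permutations op_name_list op_name_list.length).foldl (fun new_op_list perm_name_list =>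
      new_op_list ++ [(PySem.List.pyRange 0 l 1).map (fun i =>
        (PySem.List.pyGetD perm_name_list i "",
         PySem.List.pyGetD op_pos_list i 0))]) []
  else []  -- Python raises TypeError here (`raise NotImplemented()`); excluded by Pre_symmetrize

-- ===== PORT B =====
-- B's recursive generator `build`: pick each remaining name in index order, pair it with the next
-- position, recurse on the rest; emits the accumulated row when no positions are left.
def symAltBuild (remaining : List String) (rest_ops : List (String × Int))
    (pre : List (String × Int)) : List (List (String × Int)) :=
  match rest_ops with
  | [] => [pre]
  | op0 :: rest =>
    (PySem.List.enumerate remaining).foldl (fun out p =>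
      out ++ symAltBuild
        (PySem.List.slice remaining none (some p.1) ++ PySem.List.slice remaining (some (p.1 + 1)) none)
        rest (pre ++ [(p.2, op0.2)])) []

def symmetrize_alt (op_list : List (String × Int)) (mode : String) : List (List (String × Int)) :=
  let names := op_list.map (fun op => op.1)
  if mode = "cyclic" then
    (PySem.List.pyRange 0 (op_list.length : Int) 1).map (fun off =>
      ((PySem.List.slice names (some off) none ++ PySem.List.slice names none (some off)).zip op_list).map
        (fun p => (p.1, p.2.2)))
  else if mode = "full" then
    symAltBuild names op_list []
  else []  -- Python B raises NotImplementedError here; excluded by Pre_symmetrize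

-- ===== PRECONDITION & SPEC =====
-- Pre_ excludes exactly the unknown modes, on which Python A raises TypeError (`raise NotImplemented()`).
def Pre_symmetrize (op_list : List (String × Int)) (mode : String) : Prop :=
  mode = "cyclic" ∨ mode = "full"
instance (op_list : List (String × Int)) (mode : String) : Decidable (Pre_symmetrize op_list mode) := by unfold Pre_symmetrize; infer_instance
def pvWitness_symmetrize : (List (String × Int)) × String := ([("a", 1), ("b", 2)], "full")
def Spec_symmetrize (op_list : List (String × Int)) (mode : String) (out : List (List (String × Int))) : Prop := out = symmetrize_alt op_list mode
instance (op_list : List (String × Int)) (mode : String) (out : List (List (String × Int))) : Decidable (Spec_symmetrize op_list mode out) := by unfold Spec_symmetrize; infer_instance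

-- ===== CLAIM (what is proved, stated in full; the proofs are below) =====
def Claim_equal_symmetrize : Prop := ∀ (op_list : List (String × Int)) (mode : String), Dom_symmetrize op_list mode → Pre_symmetrize op_list mode → Spec_symmetrize op_list mode (symmetrize op_list mode)

-- ===== LEMMAS AND PROOFS =====

-- A's indexed row comprehension is the zip of the permuted names with the positions.
lemma symA_row (perm : List String) (ops : List (String × Int)) (h : perm.length = ops.length) :
    (PySem.List.pyRange 0 (ops.length : Int) 1).map (fun i =>
      (PySem.List.pyGetD perm i "", PySem.List.pyGetD (ops.map (fun op => op.2)) i 0))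
    = List.zipWith (fun n op => (n, op.2)) perm ops := by
  rw [PySem.List.pyRange_zero_nat, List.map_map]
  apply List.ext_getElem
  · simp [h]
  · intro k hk1 hk2
    simp only [List.getElem_map, Function.comp_apply, List.getElem_range,
      PySem.List.pyGetD_natCast, List.getElem_zipWith]
    have hk : k < ops.length := by simp at hk2; omega
    rw [List.getD_eq_getElem _ _ (by omega), List.getD_eq_getElem _ _ (by simp; omega)]
    simp

-- B's recursive generator produces exactly itertools.permutations' rows, zipped with the positions.
lemma symAltBuild_spec (ops : List (String × Int)) :
    ∀ (remaining : List String) (pre : List (String × Int)), remaining.length = ops.length →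
    symAltBuild remaining ops pre
    = (PySem.List.permutations remaining ops.length).map
        (fun p => pre ++ List.zipWith (fun n op => (n, op.2)) p ops) := by
  induction ops with
  | nil =>
    intro remaining pre _
    simp [symAltBuild]
  | cons op0 rest ih =>
    intro remaining pre hlen
    rw [symAltBuild, PySem.List.foldl_append_eq_flatMap, List.nil_append,
      PySem.List.enumerate_eq_map_pyRange remaining "", PySem.List.len]
    rw [show ((remaining.length : Int)) = ((remaining.length : Nat) : Int) from rfl,
      PySem.List.pyRange_zero_nat, List.map_map, List.flatMap_map]
    show List.flatMap _ _ = _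
    rw [List.length_cons, PySem.List.permutations, List.map_flatMap]
    apply List.flatMap_congr
    intro k hk
    have hk' : k < remaining.length := List.mem_range.mp hk
    have h1 : remaining[k]? = some remaining[k] := List.getElem?_eq_getElem hk'
    simp only [Function.comp_apply, h1, PySem.List.pyGetD_natCast,
      List.getD_eq_getElem remaining _ hk']
    rw [PySem.List.slice_to_natCast,
      show ((k : Int) + 1) = ((k + 1 : Nat) : Int) by push_cast; ring,
      PySem.List.slice_from_natCast,
      ← List.eraseIdx_eq_take_drop_succ]
    rw [ih (remaining.eraseIdx k) (pre ++ [(remaining[k], op0.2)])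
      (by rw [List.length_eraseIdx_of_lt hk']; simp at hlen ⊢; omega)]
    rw [List.map_map]
    apply List.map_congr_left
    intro p _
    simp

-- The rotated-and-zipped cyclic row of B equals A's modular-index row.
lemma symCyc_row (ops : List (String × Int)) (k : Nat) (hk : k < ops.length) :
    (PySem.List.pyRange 0 (ops.length : Int) 1).map (fun i =>
      (PySem.List.pyGetD (ops.map (fun op => op.1)) (PySem.Int.mod (i + (k : Int)) (ops.length : Int)) "",
       PySem.List.pyGetD (ops.map (fun op => op.2)) i 0))
    = ((PySem.List.slice (ops.map (fun op => op.1)) (some (k : Int)) none ++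
        PySem.List.slice (ops.map (fun op => op.1)) none (some (k : Int))).zip ops).map
        (fun p => (p.1, p.2.2)) := by
  set names := ops.map (fun op => op.1) with hnames
  have hlen : names.length = ops.length := by simp [hnames]
  rw [PySem.List.slice_from_natCast, PySem.List.slice_to_natCast, PySem.List.pyRange_zero_nat,
    List.map_map]
  apply List.ext_getElem
  · simp [hlen]; omega
  · intro i hi1 hi2
    have hi : i < ops.length := by simpa using hi1
    simp only [List.getElem_map, Function.comp_apply, List.getElem_range, List.getElem_zip]
    rw [show ((i : Int) + (k : Int)) = ((i + k : Nat) : Int) by push_cast; ring,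
      PySem.Int.mod_natCast, PySem.List.pyGetD_natCast, PySem.List.pyGetD_natCast]
    have hmod : (i + k) % ops.length < ops.length := Nat.mod_lt _ (by omega)
    rw [List.getD_eq_getElem names _ (by omega), List.getD_eq_getElem _ _ (by simp; omega)]
    have hdl : (names.drop k).length = ops.length - k := by simp [hlen]
    congr 1
    · -- names[(i+k) % l] = (drop k ++ take k)[i]
      by_cases hc : i + k < ops.length
      · rw [List.getElem_append_left (by omega), List.getElem_drop]
        exact getElem_congr rfl (by rw [Nat.mod_eq_of_lt hc]; omega) (by omega)
      · rw [List.getElem_append_right (by omega), List.getElem_take]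
        exact getElem_congr rfl (by rw [Nat.mod_eq_sub_mod (by omega), Nat.mod_eq_of_lt (by omega)]; omega) (by omega)
    · simp

-- ===== VERDICT (by name: the statement is the Claim_ definition above) =====
theorem symmetrize_spec : Claim_equal_symmetrize := by
  intro op_list mode _ hpre
  unfold Spec_symmetrize symmetrize symmetrize_alt
  rcases hpre with h | h <;> subst h <;> simp only [String.reduceEq, reduceIte]
  · -- cyclic
    rw [PySem.List.foldl_append_singleton_eq_map]
    rw [List.nil_append]
    apply List.map_congr_left
    intro off hoff
    have hb := (PySem.List.mem_pyRange_one.mp hoff)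
    obtain ⟨k, rfl⟩ : ∃ k : Nat, off = (k : Int) := ⟨off.toNat, by omega⟩
    have hk : k < op_list.length := by exact_mod_cast hb.2
    exact symCyc_row op_list k hk
  · -- full
    rw [PySem.List.foldl_append_singleton_eq_map, List.nil_append]
    rw [symAltBuild_spec op_list (op_list.map (fun op => op.1)) [] (by simp)]
    rw [show (op_list.map (fun op => op.1)).length = op_list.length by simp]
    apply List.map_congr_left
    intro perm hperm
    have hlen : perm.length = op_list.length := by
      have hmem : perm ∈ PySem.List.permutations (List.map (fun op => op.1) op_list)
          (List.map (fun op => op.1) op_list).length := by simpa using hperm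
      have := PySem.List.perm_of_mem_permutations hmem
      simpa using this.length_eq
    rw [List.nil_append]
    exact symA_row perm op_list hlen
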